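-- pv_equiv track=rewrite | github.com/afiqnabiha/MESIN-LEARNING-3-4 | week-3/args_n_kwargs/Main.py | sortOperator
-- ===== SOURCE A (Python) =====
-- def sortOperator(operator:list):
--     # ["*", "x", "/", ":", "+", "-"]
--     operators = []
--     x = 0
--     if not any(operator in ["*", "x", "/", ":", "+", "-"] for operator in ["*", "x", "/", ":", "+", "-"]):
--         raise Exception(f"invalid operator type {operator}")
--     for i in operator:
--         if i in ["*", "x", "/", ":"]:
--             operators.append(i)
--
--     for i in operator:
--         if i in ["+", "-"]:
--             operators.append(i)
--
--     return operators
-- ===== SOURCE B (Python) =====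
-- def sortOperator(operator: list):
--     # One pass, two buckets: multiplicative operators then additive ones.
--     mult = []
--     add = []
--     for i in operator:
--         if i in ("*", "x", "/", ":"):
--             mult.append(i)
--         elif i in ("+", "-"):
--             add.append(i)
--     return mult + add
-- ===== Notes on version B (the rewrite author's own statement) =====
-- stated objective: simpler
-- what changed: Single pass maintaining two buckets (mult, add) concatenated at the end, replacing A's two sequential scans, and dropping A's dead validation block whose generator never reads the parameter and can never raise.
import Mathlib
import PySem

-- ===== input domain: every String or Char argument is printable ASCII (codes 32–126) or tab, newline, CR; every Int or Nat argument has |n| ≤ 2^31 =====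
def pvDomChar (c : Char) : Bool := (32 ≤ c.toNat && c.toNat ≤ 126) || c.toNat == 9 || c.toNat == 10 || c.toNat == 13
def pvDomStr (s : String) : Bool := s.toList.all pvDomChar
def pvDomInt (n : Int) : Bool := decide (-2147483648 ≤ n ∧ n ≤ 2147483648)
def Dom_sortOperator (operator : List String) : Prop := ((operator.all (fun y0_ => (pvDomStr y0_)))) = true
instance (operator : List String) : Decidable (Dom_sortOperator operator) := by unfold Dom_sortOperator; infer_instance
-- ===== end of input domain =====

-- B replaces A's two sequential scans by one pass with two buckets and drops A's dead validation block (simpler).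


-- ===== PORT A =====
-- A's validation 'any(operator in [...] for operator in [...])' ranges over a constant
-- list only (the loop variable shadows the parameter), so it is always True and the
-- raise is dead code; it is ported as the constant test it is.
def sortOperator (operator : List String) : List String :=
  let operators : List String := []
  if !((["*", "x", "/", ":", "+", "-"] : List String).any
        (fun op => (["*", "x", "/", ":", "+", "-"] : List String).contains op)) then
    []  -- unreachable (the condition is constantly false); Python would raise here
  else
    let operators := operator.foldl
      (fun acc i => if (["*", "x", "/", ":"] : List String).contains i then acc ++ [i] else acc)
      operators
    let operators := operator.foldl
      (fun acc i => if (["+", "-"] : List String).contains i then acc ++ [i] else acc)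
      operators
    operators

-- ===== PORT B =====
def sortOperator_alt (operator : List String) : List String :=
  let p := operator.foldl
    (fun (s : List String × List String) i =>
      if (["*", "x", "/", ":"] : List String).contains i then (s.1 ++ [i], s.2)
      else if (["+", "-"] : List String).contains i then (s.1, s.2 ++ [i])
      else s)
    (([], []) : List String × List String)
  p.1 ++ p.2

-- ===== PRECONDITION & SPEC =====
def Spec_sortOperator (operator : List String) (out : List String) : Prop := out = sortOperator_alt operator
instance (operator : List String) (out : List String) : Decidable (Spec_sortOperator operator out) := by unfold Spec_sortOperator; infer_instance

-- ===== CLAIM (what is proved, stated in full; the proofs are below) =====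
def Claim_equal_sortOperator : Prop := ∀ (operator : List String), Dom_sortOperator operator → Spec_sortOperator operator (sortOperator operator)

-- ===== LEMMAS AND PROOFS =====

-- the two operator classes are disjoint
theorem mult_not_add (i : String) :
    (["*", "x", "/", ":"] : List String).contains i = true →
    (["+", "-"] : List String).contains i = false := by
  intro h
  simp only [List.contains_eq_mem, List.mem_cons, List.not_mem_nil, or_false,
    decide_eq_true_eq, decide_eq_false_iff_not] at *
  rcases h with h | h | h | h <;> subst h <;> simp

-- B's fold computes both filters at once
theorem bfold_eq (xs m a : List String) :
    xs.foldl
      (fun (s : List String × List String) i =>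
        if (["*", "x", "/", ":"] : List String).contains i then (s.1 ++ [i], s.2)
        else if (["+", "-"] : List String).contains i then (s.1, s.2 ++ [i])
        else s)
      (m, a)
    = (m ++ xs.filter (fun i => (["*", "x", "/", ":"] : List String).contains i),
       a ++ xs.filter (fun i => (["+", "-"] : List String).contains i)) := by
  induction xs generalizing m a with
  | nil => simp
  | cons i xs ih =>
    rw [List.foldl_cons, List.filter_cons, List.filter_cons]
    cases hm : (["*", "x", "/", ":"] : List String).contains i with
    | true =>
      have ha := mult_not_add i hm
      simp only [ha, if_true, Bool.false_eq_true, if_false, ih, List.append_assoc,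
        List.singleton_append]
    | false =>
      cases ha : (["+", "-"] : List String).contains i with
      | true =>
        simp only [if_true, Bool.false_eq_true, if_false, ih, List.append_assoc,
          List.singleton_append]
      | false =>
        simp only [Bool.false_eq_true, if_false, ih]

-- ===== VERDICT (by name: the statement is the Claim_ definition above) =====
theorem sortOperator_spec : Claim_equal_sortOperator := by
  intro operator _
  unfold Spec_sortOperator sortOperator sortOperator_alt
  rw [bfold_eq]
  simp only []
  rw [if_neg (by decide)]
  rw [PySem.List.foldl_append_if_eq_filter, PySem.List.foldl_append_if_eq_filter]
  simp only [List.nil_append]
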